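-- pv_equiv track=rewrite | github.com/octaviobrito/calculadora-fgts | calc_fgts.py | _format_date_mask
-- ===== SOURCE A (Python) =====
-- def _format_date_mask(s: str) -> str:
--     digits = "".join(ch for ch in s if ch.isdigit())[:8]  # ddmmaaaa
--     out = ""
--     for i, ch in enumerate(digits):
--         if i in (2, 4):
--             out += "/"
--         out += ch
--     return out
-- ===== SOURCE B (Python) =====
-- def _format_date_mask(s: str) -> str:
--     d = "".join(ch for ch in s if ch.isdigit())[:8]
--     return "/".join(p for p in (d[:2], d[2:4], d[4:8]) if p)
-- ===== Notes on version B (the rewrite author's own statement) =====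
-- stated objective: simpler
-- what changed: Replaces A's per-character loop with an index sentinel inserting a separator before positions 2 and 4 by slicing the digit string into three fixed fields (day, month, year) and joining the non-empty ones with the slash separator.
import Mathlib
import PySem

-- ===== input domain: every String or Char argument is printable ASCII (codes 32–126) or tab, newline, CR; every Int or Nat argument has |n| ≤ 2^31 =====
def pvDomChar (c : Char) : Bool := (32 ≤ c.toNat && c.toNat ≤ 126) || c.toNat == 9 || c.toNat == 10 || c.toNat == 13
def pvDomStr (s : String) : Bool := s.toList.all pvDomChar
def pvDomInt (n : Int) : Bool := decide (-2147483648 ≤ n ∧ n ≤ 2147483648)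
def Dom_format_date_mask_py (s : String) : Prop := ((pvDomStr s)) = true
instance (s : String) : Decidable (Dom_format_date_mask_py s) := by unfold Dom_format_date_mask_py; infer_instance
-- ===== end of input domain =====

-- B replaces A's per-character index-sentinel scan by a fixed three-field slicing
-- joined with '/'; objective: simpler.

-- ===== PORT A =====
def format_date_mask_py (s : String) : String :=
  let digits := (s.toList.filter PySem.Chars.isdigit).take 8
  String.ofList ((PySem.List.enumerate digits 0).foldl
    (fun out (p : Int × Char) =>
      (if p.1 = 2 ∨ p.1 = 4 then out ++ ['/'] else out) ++ [p.2]) [])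

-- ===== PORT B =====
def format_date_mask_py_alt (s : String) : String :=
  let d := (s.toList.filter PySem.Chars.isdigit).take 8
  let parts := [PySem.List.slice d none (some 2),
                PySem.List.slice d (some 2) (some 4),
                PySem.List.slice d (some 4) (some 8)].filter (· ≠ [])
  String.ofList (PySem.Chars.join ['/'] parts)

-- ===== PRECONDITION & SPEC =====
def Spec_format_date_mask_py (s : String) (out : String) : Prop := out = format_date_mask_py_alt s
instance (s : String) (out : String) : Decidable (Spec_format_date_mask_py s out) := by unfold Spec_format_date_mask_py; infer_instance

-- ===== CLAIM (what is proved, stated in full; the proofs are below) =====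
def Claim_equal_format_date_mask_py : Prop := ∀ (s : String), Dom_format_date_mask_py s → Spec_format_date_mask_py s (format_date_mask_py s)

-- ===== LEMMAS AND PROOFS =====

-- Core lemma: for any digit list of length ≤ 8 the two constructions agree.
theorem core (d : List Char) (h : d.length ≤ 8) :
    (PySem.List.enumerate d 0).foldl
      (fun out (p : Int × Char) =>
        (if p.1 = 2 ∨ p.1 = 4 then out ++ ['/'] else out) ++ [p.2]) []
    = PySem.Chars.join ['/']
        (([PySem.List.slice d none (some 2),
           PySem.List.slice d (some 2) (some 4),
           PySem.List.slice d (some 4) (some 8)]).filter (· ≠ [])) := by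
  match d with
  | [] => rfl
  | [a] => rfl
  | [a,b] => rfl
  | [a,b,c] => rfl
  | [a,b,c,e] => rfl
  | [a,b,c,e,f] => rfl
  | [a,b,c,e,f,g] => rfl
  | [a,b,c,e,f,g,i] => rfl
  | [a,b,c,e,f,g,i,j] => rfl
  | a::b::c::e::f::g::i::j::k::rest => exfalso; simp at h; omega

-- ===== VERDICT (by name: the statement is the Claim_ definition above) =====
theorem format_date_mask_py_spec : Claim_equal_format_date_mask_py := by
  intro s _
  unfold Spec_format_date_mask_py format_date_mask_py format_date_mask_py_alt
  exact congrArg String.ofList (core _ (by simp [List.length_take]))
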